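-- pv_equiv track=rewrite | github.com/otitheedev/master_automation_index | ossl/Testing Report All/testing.py | prioritize_routes
-- ===== SOURCE A (Python) =====
-- def prioritize_routes(routes: list, priority_patterns: list) -> list:
--     """Prioritize important routes to the front of the list."""
--     priority_routes = []
--     other_routes = []
--
--     for route in routes:
--         route_path = route.lstrip('/')
--         if any(pattern.lstrip('/') in route_path for pattern in priority_patterns):
--             priority_routes.append(route)
--         else:
--             other_routes.append(route)
--
--     return priority_routes + other_routes
-- ===== SOURCE B (Python) =====
-- def prioritize_routes(routes: list, priority_patterns: list) -> list:
--     """Prioritize important routes to the front of the list."""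
--     pats = [p.lstrip('/') for p in priority_patterns]
--     return sorted(routes, key=lambda r: not any(p in r.lstrip('/') for p in pats))
-- ===== Notes on version B (the rewrite author's own statement) =====
-- stated objective: idiomatic
-- what changed: A's two-accumulator partition loop plus concatenation is replaced by one stable sorted() call with a boolean match key (patterns lstripped once up front); sort stability yields the same stable partition.
import Mathlib
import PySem

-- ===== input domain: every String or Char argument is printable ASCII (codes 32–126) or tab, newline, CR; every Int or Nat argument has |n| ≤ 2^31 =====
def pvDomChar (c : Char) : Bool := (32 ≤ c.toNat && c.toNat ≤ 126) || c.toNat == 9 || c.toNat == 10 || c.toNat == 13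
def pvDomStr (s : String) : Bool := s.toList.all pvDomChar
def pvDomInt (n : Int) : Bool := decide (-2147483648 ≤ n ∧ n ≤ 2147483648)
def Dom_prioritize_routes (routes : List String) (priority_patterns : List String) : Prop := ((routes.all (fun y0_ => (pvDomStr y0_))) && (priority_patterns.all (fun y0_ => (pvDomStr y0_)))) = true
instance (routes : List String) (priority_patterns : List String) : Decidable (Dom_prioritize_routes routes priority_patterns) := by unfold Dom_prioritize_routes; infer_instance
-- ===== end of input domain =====

-- B replaces A's two-accumulator partition loop by one stable sort with a boolean match key (idiomatic).

-- ===== PORT A =====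
-- hand port of s.lstrip('/'): drop leading '/' characters (exact for a one-char strip set)
def pvLstripSlash (cs : List Char) : List Char := cs.dropWhile (fun c => c == '/')

def prioritize_routes (routes : List String) (priority_patterns : List String) : List String :=
  let acc := routes.foldl
    (fun (acc : List String × List String) route =>
      let route_path := pvLstripSlash route.toList
      if priority_patterns.any (fun pattern => PySem.Chars.isIn (pvLstripSlash pattern.toList) route_path)
      then (acc.1 ++ [route], acc.2)
      else (acc.1, acc.2 ++ [route]))
    ([], [])
  acc.1 ++ acc.2

-- ===== PORT B =====
def prioritize_routes_alt (routes : List String) (priority_patterns : List String) : List String :=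
  let pats := priority_patterns.map (fun p => pvLstripSlash p.toList)
  PySem.List.sorted routes
    (fun r => !(pats.any (fun p => PySem.Chars.isIn p (pvLstripSlash r.toList)))) false

-- ===== PRECONDITION & SPEC =====
def Spec_prioritize_routes (routes : List String) (priority_patterns : List String) (out : List String) : Prop := out = prioritize_routes_alt routes priority_patterns
instance (routes : List String) (priority_patterns : List String) (out : List String) : Decidable (Spec_prioritize_routes routes priority_patterns out) := by unfold Spec_prioritize_routes; infer_instance

-- ===== CLAIM =====
def Claim_equal_prioritize_routes : Prop := ∀ (routes : List String) (priority_patterns : List String), Dom_prioritize_routes routes priority_patterns → Spec_prioritize_routes routes priority_patterns (prioritize_routes routes priority_patterns)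

-- ===== LEMMAS AND PROOFS =====
-- A's loop is the stable partition filter h ++ filter !h.
theorem pv_loop {α : Type} (rs : List α) (h : α → Bool) (a b : List α) :
    rs.foldl
      (fun (acc : List α × List α) route =>
        if h route then (acc.1 ++ [route], acc.2) else (acc.1, acc.2 ++ [route]))
      (a, b)
    = (a ++ rs.filter h, b ++ rs.filter (fun r => !h r)) := by
  induction rs generalizing a b with
  | nil => simp
  | cons r rs ih => by_cases hr : h r <;> simp [List.foldl_cons, hr, ih]

-- insertBy into a false-keys ++ true-keys list places a false-keyed element between the blocks
theorem pv_insertBy_mid {α : Type} (key : α → Bool) (x : α) (A B : List α)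
    (hA : ∀ a ∈ A, (decide (key x < key a)) = false)
    (hB : ∀ b ∈ B, (decide (key x < key b)) = true) :
    PySem.List.insertBy (fun a b => decide (key a < key b)) x (A ++ B) = A ++ x :: B := by
  induction A with
  | nil =>
    cases B with
    | nil => simp [PySem.List.insertBy]
    | cons y ys => simp [PySem.List.insertBy, hB y (by simp)]
  | cons a as ih =>
    have hx := hA a (by simp)
    simp only [List.cons_append, PySem.List.insertBy, hx]
    simp only [Bool.false_eq_true, if_false]
    rw [ih (fun a ha => hA a (by simp [ha]))]

-- stable insertion sort by a boolean key = false-keyed elements (in order) ++ true-keyed elements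
theorem pv_sorted_bool {α : Type} (xs : List α) (key : α → Bool) :
    ∀ (A B : List α), (∀ a ∈ A, key a = false) → (∀ b ∈ B, key b = true) →
    xs.foldl (fun acc x => PySem.List.insertBy (fun a b => decide (key a < key b)) x acc) (A ++ B)
      = (A ++ xs.filter (fun x => !key x)) ++ (B ++ xs.filter key) := by
  induction xs with
  | nil => intro A B _ _; simp
  | cons x xs ih =>
    intro A B hA hB
    simp only [List.foldl_cons]
    by_cases hx : key x
    · rw [show A ++ B = (A ++ B) ++ ([] : List α) by simp,
        pv_insertBy_mid key x (A ++ B) []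
          (by intro a ha; simp [hx])
          (by intro b hb; simp at hb)]
      have := ih A (B ++ [x]) hA
        (by intro b hb; rcases List.mem_append.mp hb with h | h
            · exact hB b h
            · simp at h; simpa [h] using hx)
      simp only [List.append_assoc] at this ⊢
      rw [this]
      simp [hx]
    · have hx' : key x = false := by simpa using hx
      rw [pv_insertBy_mid key x A B
          (by intro a ha; simp [hx', hA a ha])
          (by intro b hb; simp [hx', hB b hb])]
      have := ih (A ++ [x]) B
        (by intro a ha; rcases List.mem_append.mp ha with h | h
            · exact hA a h
            · simp at h; simpa [h] using hx')
        hB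
      simp only [List.append_assoc, List.singleton_append] at this ⊢
      rw [this]
      simp [hx']

-- ===== VERDICT =====
theorem prioritize_routes_spec : Claim_equal_prioritize_routes := by
  intro routes priority_patterns _
  unfold Spec_prioritize_routes prioritize_routes prioritize_routes_alt
  simp only [PySem.List.sorted, List.any_map, Function.comp_def, Bool.false_eq_true, if_false]
  rw [pv_loop routes (fun route =>
    priority_patterns.any (fun pattern =>
      PySem.Chars.isIn (pvLstripSlash pattern.toList) (pvLstripSlash route.toList))) [] []]
  have := pv_sorted_bool routes (fun r =>
    !(priority_patterns.any (fun pattern =>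
      PySem.Chars.isIn (pvLstripSlash pattern.toList) (pvLstripSlash r.toList)))) [] []
    (by simp) (by simp)
  simp only [List.nil_append, List.append_nil, Bool.not_not] at this
  simp only [this]
  simp
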